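-- pv_equiv track=rewrite | github.com/SpikeKing/My-Bert | labels/data_prelabeled.py | check_inside_box
-- ===== SOURCE A (Python) =====
-- def check_inside_box(p_box, box, oh=0, ow=0):
--     x_min, y_min, x_max, y_max = p_box
--     is_inside = True
--     for pt in box:
--         if x_min - ow < pt[0] < x_max + ow and y_min - oh < pt[1] < y_max + oh:
--             continue
--         else:
--             is_inside = False
--     return is_inside
-- ===== SOURCE B (Python) =====
-- def check_inside_box(p_box, box, oh=0, ow=0):
--     x_min, y_min, x_max, y_max = p_box
--     if not box:
--         return True
--     xs_min = min(pt[0] for pt in box)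
--     xs_max = max(pt[0] for pt in box)
--     ys_min = min(pt[1] for pt in box)
--     ys_max = max(pt[1] for pt in box)
--     return (x_min - ow < xs_min and xs_max < x_max + ow
--             and y_min - oh < ys_min and ys_max < y_max + oh)
-- ===== Notes on version B (the rewrite author's own statement) =====
-- stated objective: simpler
-- what changed: Replaces the per-point flag loop with aggregate extremes: compute min/max of x and y coordinates once and compare them to the padded bounds (empty box returns True directly).
import Mathlib
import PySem

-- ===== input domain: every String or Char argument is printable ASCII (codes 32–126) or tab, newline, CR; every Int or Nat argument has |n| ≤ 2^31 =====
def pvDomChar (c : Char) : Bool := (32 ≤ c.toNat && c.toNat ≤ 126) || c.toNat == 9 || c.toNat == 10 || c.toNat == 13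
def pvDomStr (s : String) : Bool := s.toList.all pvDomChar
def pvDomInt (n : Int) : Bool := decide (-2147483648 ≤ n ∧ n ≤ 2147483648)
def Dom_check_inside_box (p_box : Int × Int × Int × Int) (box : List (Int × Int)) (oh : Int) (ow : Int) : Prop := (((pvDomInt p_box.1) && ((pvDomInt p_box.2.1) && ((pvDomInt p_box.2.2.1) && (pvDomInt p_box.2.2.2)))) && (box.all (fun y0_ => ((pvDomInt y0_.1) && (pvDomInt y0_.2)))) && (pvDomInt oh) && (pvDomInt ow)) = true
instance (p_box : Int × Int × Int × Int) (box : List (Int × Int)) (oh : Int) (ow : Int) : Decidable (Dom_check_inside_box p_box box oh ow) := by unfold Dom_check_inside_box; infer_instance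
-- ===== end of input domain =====

-- ===== PORT A =====
-- B replaces the per-point flag loop by comparing the coordinate extremes to the padded bounds (simpler decomposition).
def check_inside_box (p_box : Int × Int × Int × Int) (box : List (Int × Int)) (oh : Int) (ow : Int) : Bool :=
  let x_min := p_box.1; let y_min := p_box.2.1; let x_max := p_box.2.2.1; let y_max := p_box.2.2.2
  box.foldl (fun is_inside pt =>
    if x_min - ow < pt.1 ∧ pt.1 < x_max + ow ∧ y_min - oh < pt.2 ∧ pt.2 < y_max + oh then
      is_inside
    else
      false) true

-- ===== PORT B =====
def check_inside_box_alt (p_box : Int × Int × Int × Int) (box : List (Int × Int)) (oh : Int) (ow : Int) : Bool :=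
  let x_min := p_box.1; let y_min := p_box.2.1; let x_max := p_box.2.2.1; let y_max := p_box.2.2.2
  match box with
  | [] => true
  | p :: ps =>
    let xs_min := ps.foldl (fun m q => min m q.1) p.1
    let xs_max := ps.foldl (fun m q => max m q.1) p.1
    let ys_min := ps.foldl (fun m q => min m q.2) p.2
    let ys_max := ps.foldl (fun m q => max m q.2) p.2
    decide (x_min - ow < xs_min ∧ xs_max < x_max + ow ∧ y_min - oh < ys_min ∧ ys_max < y_max + oh)

-- ===== PRECONDITION & SPEC =====
def Spec_check_inside_box (p_box : Int × Int × Int × Int) (box : List (Int × Int)) (oh : Int) (ow : Int) (out : Bool) : Prop := out = check_inside_box_alt p_box box oh ow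
instance (p_box : Int × Int × Int × Int) (box : List (Int × Int)) (oh : Int) (ow : Int) (out : Bool) : Decidable (Spec_check_inside_box p_box box oh ow out) := by unfold Spec_check_inside_box; infer_instance

-- ===== CLAIM (what is proved, stated in full; the proofs are below) =====
def Claim_equal_check_inside_box : Prop := ∀ (p_box : Int × Int × Int × Int) (box : List (Int × Int)) (oh : Int) (ow : Int), Dom_check_inside_box p_box box oh ow → Spec_check_inside_box p_box box oh ow (check_inside_box p_box box oh ow)

-- ===== LEMMAS AND PROOFS =====

-- ===== VERDICT (by name: the statement is the Claim_ definition above) =====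
-- A's flag loop computes "all points satisfy the padded-bound condition".
theorem foldl_flag (cond : Int × Int → Prop) [DecidablePred cond] (box : List (Int × Int)) (b : Bool) :
    box.foldl (fun s pt => if cond pt then s else false) b
      = (b && box.all (fun pt => decide (cond pt))) := by
  induction box generalizing b with
  | nil => simp
  | cons a l ih =>
    rw [List.foldl_cons, ih, List.all_cons]
    by_cases h : cond a
    · simp [h, Bool.and_assoc]
    · simp [h]

theorem foldl_min_lt (lo : Int) (f : Int × Int → Int) (ps : List (Int × Int)) (a : Int) :
    (lo < ps.foldl (fun m q => min m (f q)) a) ↔ (lo < a ∧ ∀ q ∈ ps, lo < f q) := by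
  induction ps generalizing a with
  | nil => simp
  | cons b l ih =>
    simp only [List.foldl_cons, ih, lt_min_iff, List.mem_cons]
    constructor
    · rintro ⟨⟨h1, h2⟩, h3⟩
      exact ⟨h1, fun q hq => hq.elim (fun e => e ▸ h2) (h3 q)⟩
    · rintro ⟨h1, h2⟩
      exact ⟨⟨h1, h2 b (Or.inl rfl)⟩, fun q hq => h2 q (Or.inr hq)⟩

theorem foldl_max_lt (hi : Int) (f : Int × Int → Int) (ps : List (Int × Int)) (a : Int) :
    (ps.foldl (fun m q => max m (f q)) a < hi) ↔ (a < hi ∧ ∀ q ∈ ps, f q < hi) := by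
  induction ps generalizing a with
  | nil => simp
  | cons b l ih =>
    simp only [List.foldl_cons, ih, max_lt_iff, List.mem_cons]
    constructor
    · rintro ⟨⟨h1, h2⟩, h3⟩
      exact ⟨h1, fun q hq => hq.elim (fun e => e ▸ h2) (h3 q)⟩
    · rintro ⟨h1, h2⟩
      exact ⟨⟨h1, h2 b (Or.inl rfl)⟩, fun q hq => h2 q (Or.inr hq)⟩

theorem check_inside_box_spec : Claim_equal_check_inside_box := by
  intro p_box box oh ow _
  unfold Spec_check_inside_box check_inside_box check_inside_box_alt
  obtain ⟨x_min, y_min, x_max, y_max⟩ := p_box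
  simp only []
  rw [foldl_flag (fun pt => x_min - ow < pt.1 ∧ pt.1 < x_max + ow ∧ y_min - oh < pt.2 ∧ pt.2 < y_max + oh) box true]
  cases box with
  | nil => simp
  | cons p ps =>
    rw [Bool.eq_iff_iff]
    simp only [Bool.true_and, List.all_cons, Bool.and_eq_true, List.all_eq_true,
      decide_eq_true_eq, foldl_min_lt, foldl_max_lt]
    constructor
    · rintro ⟨⟨h1, h2, h3, h4⟩, hps⟩
      exact ⟨⟨h1, fun q hq => (hps q hq).1⟩,
             ⟨h2, fun q hq => (hps q hq).2.1⟩,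
             ⟨h3, fun q hq => (hps q hq).2.2.1⟩,
             ⟨h4, fun q hq => (hps q hq).2.2.2⟩⟩
    · rintro ⟨⟨h1, h1s⟩, ⟨h2, h2s⟩, ⟨h3, h3s⟩, ⟨h4, h4s⟩⟩
      exact ⟨⟨h1, h2, h3, h4⟩, fun q hq => ⟨h1s q hq, h2s q hq, h3s q hq, h4s q hq⟩⟩
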